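-- pv_equiv track=rewrite | github.com/sl1tan/education | some_tasks/two_dimensional array/snake.py | Horizontal_snake
-- ===== SOURCE A (Python) =====
-- def Horizontal_snake(x, y):
--     arr = []
--     for i in range(x):
--         if i % 2 == 0:
--             in_arr = [i + 1 for i in range(y * i, y * (i + 1))]
--             arr.append(in_arr)
--         else:
--             in_arr = [
--                 i + 1 for i in range(y * (i + 1) - 1, y * (i + 1) - 1 - y, -1)]
--             arr.append(in_arr)
--     return arr
-- ===== SOURCE B (Python) =====
-- def Horizontal_snake(x, y):
--     # Build the full 1..x*y sequence once, then cut it into y-length slices,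
--     # reversing every odd-indexed slice.
--     flat = list(range(1, max(x, 0) * max(y, 0) + 1))
--     rows = []
--     for i in range(x):
--         chunk = flat[i * y:(i + 1) * y]
--         rows.append(list(reversed(chunk)) if i % 2 else chunk)
--     return rows
-- ===== Notes on version B (the rewrite author's own statement) =====
-- stated objective: alternative
-- what changed: B materialises the 1..x*y sequence once and partitions it into y-length slices, reversing odd-indexed slices, instead of computing each row with its own ascending or descending range expression.
import Mathlib
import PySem

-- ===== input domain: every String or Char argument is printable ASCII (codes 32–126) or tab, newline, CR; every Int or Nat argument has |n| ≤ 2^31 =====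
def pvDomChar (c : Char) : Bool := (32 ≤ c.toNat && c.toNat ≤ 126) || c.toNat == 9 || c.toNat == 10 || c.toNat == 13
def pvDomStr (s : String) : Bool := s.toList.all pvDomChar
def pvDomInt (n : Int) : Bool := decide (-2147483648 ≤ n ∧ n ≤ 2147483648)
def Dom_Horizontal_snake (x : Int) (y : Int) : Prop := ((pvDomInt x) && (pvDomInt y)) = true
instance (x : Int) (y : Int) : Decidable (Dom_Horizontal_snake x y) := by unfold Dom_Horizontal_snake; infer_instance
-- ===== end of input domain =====

-- B builds the flat 1..x*y sequence once and partitions it into y-length slices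
-- (reversing odd-indexed ones) instead of computing each row from its own range
-- expression; objective: alternative decomposition, same cost.

-- ===== PORT A =====
def Horizontal_snake (x : Int) (y : Int) : List (List Int) :=
  (PySem.List.pyRange 0 x 1).foldl (fun arr i =>
    if PySem.Int.mod i 2 == 0 then
      arr ++ [(PySem.List.pyRange (y * i) (y * (i + 1)) 1).map (fun j => j + 1)]
    else
      arr ++ [(PySem.List.pyRange (y * (i + 1) - 1) (y * (i + 1) - 1 - y) (-1)).map (fun j => j + 1)]) []

-- ===== PORT B =====
def Horizontal_snake_alt (x : Int) (y : Int) : List (List Int) :=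
  let flat := PySem.List.pyRange 1 (max x 0 * max y 0 + 1) 1
  (PySem.List.pyRange 0 x 1).foldl (fun rows i =>
    let chunk := PySem.List.slice flat (some (i * y)) (some ((i + 1) * y))
    rows ++ [if PySem.Int.mod i 2 == 0 then chunk else chunk.reverse]) []

-- ===== PRECONDITION & SPEC =====
def Spec_Horizontal_snake (x : Int) (y : Int) (out : List (List Int)) : Prop := out = Horizontal_snake_alt x y
instance (x : Int) (y : Int) (out : List (List Int)) : Decidable (Spec_Horizontal_snake x y out) := by unfold Spec_Horizontal_snake; infer_instance

-- ===== CLAIM (what is proved, stated in full; the proofs are below) =====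
def Claim_equal_Horizontal_snake : Prop := ∀ (x : Int) (y : Int), Dom_Horizontal_snake x y → Spec_Horizontal_snake x y (Horizontal_snake x y)

-- ===== LEMMAS AND PROOFS =====

-- the slice B takes equals the ascending range A builds for an even row
theorem chunk_eq (x y i : Int) (h0 : 0 ≤ i) (h1 : i < x) :
    PySem.List.slice (PySem.List.pyRange 1 (max x 0 * max y 0 + 1) 1) (some (i * y)) (some ((i + 1) * y))
      = (PySem.List.pyRange (y * i) (y * (i + 1)) 1).map (fun j => j + 1) := by
  by_cases hy : y ≤ 0
  · have hm : max y 0 = 0 := by omega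
    have h2 : y * (i + 1) ≤ y * i := by nlinarith
    rw [hm, mul_zero, PySem.List.pyRange_one_eq_nil (by omega),
      PySem.List.pyRange_one_eq_nil (by omega)]
    simp [PySem.List.slice]
  · have hy : 0 < y := by omega
    have hmx : max x 0 = x := by omega
    have hmy : max y 0 = y := by omega
    rw [hmx, hmy]
    have ha : 0 ≤ i * y := mul_nonneg h0 hy.le
    have hb : 0 ≤ (i + 1) * y := mul_nonneg (by omega) hy.le
    have hbN : (i + 1) * y ≤ x * y := mul_le_mul_of_nonneg_right (by omega) hy.le
    have e1 : (i + 1) * y = i * y + y := by ring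
    have e2 : y * (i + 1) = i * y + y := by ring
    have e3 : y * i = i * y := by ring
    rw [PySem.List.slice_toNat _ ha hb, PySem.List.pyRange_one 1 (x * y + 1),
      PySem.List.pyRange_one (y * i) (y * (i + 1))]
    apply List.ext_getElem
    · simp only [List.length_take, List.length_drop, List.length_map, List.length_range]
      omega
    · intro k h₁ h₂
      simp only [List.getElem_take, List.getElem_drop, List.getElem_map, List.getElem_range]
      simp only [List.length_take, List.length_drop, List.length_map, List.length_range] at h₁
      push_cast
      omega

theorem Horizontal_snake_spec : Claim_equal_Horizontal_snake := by
  intro x y _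
  unfold Spec_Horizontal_snake Horizontal_snake Horizontal_snake_alt
  have hA : (fun (arr : List (List Int)) (i : Int) =>
      if (PySem.Int.mod i 2 == 0) = true then
        arr ++ [(PySem.List.pyRange (y * i) (y * (i + 1)) 1).map (fun j => j + 1)]
      else
        arr ++ [(PySem.List.pyRange (y * (i + 1) - 1) (y * (i + 1) - 1 - y) (-1)).map (fun j => j + 1)])
    = fun arr i => arr ++ [if (PySem.Int.mod i 2 == 0) = true then
        (PySem.List.pyRange (y * i) (y * (i + 1)) 1).map (fun j => j + 1)
      else
        (PySem.List.pyRange (y * (i + 1) - 1) (y * (i + 1) - 1 - y) (-1)).map (fun j => j + 1)] := by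
    funext arr i; split <;> rfl
  rw [hA]
  rw [PySem.List.foldl_append_singleton_eq_map, PySem.List.foldl_append_singleton_eq_map]
  simp only [List.nil_append]
  apply List.map_congr_left
  intro i hi
  rw [PySem.List.mem_pyRange_one] at hi
  have hc := chunk_eq x y i hi.1 hi.2
  by_cases h : PySem.Int.mod i 2 == 0
  · simp only [h, if_true, hc]
  · simp only [h, hc]
    rw [PySem.List.pyRange_neg_one_eq_reverse, List.map_reverse]
    congr 2
    ring_nf
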